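-- pv_equiv track=rewrite | github.com/goclem/destruction | destruction_utilities.py | make_tuple_pair
-- ===== SOURCE A (Python) =====
-- def make_tuple_pair(n, step_size):
--     iters = n//step_size
--     l = []
--     for i in range(0, iters):
--         if i == iters - 1:
--             t = (i*step_size, n)
--             l.append(t)
--         else:
--             t = (i*step_size, (i+1)*step_size)
--             l.append(t)
--     return l
-- ===== SOURCE B (Python) =====
-- def make_tuple_pair(n, step_size):
--     iters = n // step_size
--     bounds = [i * step_size for i in range(iters)] + [n]
--     return list(zip(bounds, bounds[1:]))
-- ===== Notes on version B (the rewrite author's own statement) =====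
-- stated objective: alternative
-- what changed: Replaces the per-index loop with its last-iteration conditional by precomputing the boundary list [0, step, 2*step, ..., n] and zipping it with its own tail; the 'end = n' case falls out because n is the final boundary, so no branch is needed.
import Mathlib
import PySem

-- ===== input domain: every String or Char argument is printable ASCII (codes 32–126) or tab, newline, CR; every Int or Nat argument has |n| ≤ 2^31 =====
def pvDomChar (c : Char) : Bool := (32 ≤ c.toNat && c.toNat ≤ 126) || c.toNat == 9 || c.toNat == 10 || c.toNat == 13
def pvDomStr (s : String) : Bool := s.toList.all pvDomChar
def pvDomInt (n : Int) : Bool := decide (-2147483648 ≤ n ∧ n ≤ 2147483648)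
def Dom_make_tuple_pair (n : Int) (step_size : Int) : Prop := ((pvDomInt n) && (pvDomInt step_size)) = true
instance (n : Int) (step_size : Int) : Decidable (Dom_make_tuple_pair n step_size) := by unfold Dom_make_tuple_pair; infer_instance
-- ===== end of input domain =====

-- B builds the boundary list and pairs consecutive boundaries via zip, eliminating A's
-- last-iteration conditional; same cost, different decomposition (objective: alternative).

-- ===== PORT A =====
def make_tuple_pair (n : Int) (step_size : Int) : List (Int × Int) :=
  let iters := PySem.Int.floordiv n step_size
  (PySem.List.pyRange 0 iters 1).foldl
    (fun l i =>
      if i = iters - 1 then l ++ [(i * step_size, n)]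
      else l ++ [(i * step_size, (i + 1) * step_size)])
    []

-- ===== PORT B =====
def make_tuple_pair_alt (n : Int) (step_size : Int) : List (Int × Int) :=
  let iters := PySem.Int.floordiv n step_size
  let bounds := (PySem.List.pyRange 0 iters 1).map (fun i => i * step_size) ++ [n]
  bounds.zip bounds.tail

-- ===== PRECONDITION & SPEC =====
-- Pre_ excludes step_size = 0, on which Python A raises ZeroDivisionError.
def Pre_make_tuple_pair (n : Int) (step_size : Int) : Prop := step_size ≠ 0
instance (n : Int) (step_size : Int) : Decidable (Pre_make_tuple_pair n step_size) := by unfold Pre_make_tuple_pair; infer_instance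
def pvWitness_make_tuple_pair : Int × Int := (10, 3)
def Spec_make_tuple_pair (n : Int) (step_size : Int) (out : List (Int × Int)) : Prop := out = make_tuple_pair_alt n step_size
instance (n : Int) (step_size : Int) (out : List (Int × Int)) : Decidable (Spec_make_tuple_pair n step_size out) := by unfold Spec_make_tuple_pair; infer_instance

-- ===== CLAIM (what is proved, stated in full; the proofs are below) =====
def Claim_equal_make_tuple_pair : Prop := ∀ (n : Int) (step_size : Int), Dom_make_tuple_pair n step_size → Pre_make_tuple_pair n step_size → Spec_make_tuple_pair n step_size (make_tuple_pair n step_size)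

-- ===== LEMMAS AND PROOFS =====

-- pairing each range index with an if-on-the-last-index equals zipping the boundary
-- list with its tail; proved by induction on the number of remaining boundaries
lemma pairs_eq (s n m : Int) : ∀ (k : Nat) (a : Int), m - a = k →
    (PySem.List.pyRange a m 1).map
        (fun i => if i = m - 1 then (i * s, n) else (i * s, (i + 1) * s))
      = (let bs := (PySem.List.pyRange a m 1).map (fun i => i * s) ++ [n];
         bs.zip bs.tail) := by
  intro k
  induction k with
  | zero =>
    intro a h
    rw [PySem.List.pyRange_one_eq_nil (by omega)]
    simp
  | succ k ih =>
    intro a h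
    rw [PySem.List.pyRange_one_cons (by omega)]
    cases k with
    | zero =>
      rw [PySem.List.pyRange_one_eq_nil (by omega)]
      simp only [List.map_cons, List.map_nil, List.nil_append, List.cons_append,
        List.tail_cons, List.zip_cons_cons, List.zip_nil_right]
      have : a = m - 1 := by omega
      simp [this]
    | succ k =>
      have hlt : a + 1 < m := by omega
      have hrec := ih (a + 1) (by omega)
      rw [PySem.List.pyRange_one_cons hlt] at hrec ⊢
      simp only [List.map_cons, List.cons_append, List.tail_cons,
        List.zip_cons_cons] at hrec ⊢
      have hne : ¬ (a = m - 1) := by omega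
      simp only [hne, if_false]
      exact congrArg _ hrec

-- ===== VERDICT (by name: the statement is the Claim_ definition above) =====
theorem make_tuple_pair_spec : Claim_equal_make_tuple_pair := by
  intro n s _ _
  unfold Spec_make_tuple_pair make_tuple_pair make_tuple_pair_alt
  set m := PySem.Int.floordiv n s with hm
  -- turn A's branching foldl into a map over the range
  have hbody : (fun (l : List (Int × Int)) (i : Int) =>
      if i = m - 1 then l ++ [(i * s, n)] else l ++ [(i * s, (i + 1) * s)])
      = fun l i => l ++ [if i = m - 1 then (i * s, n) else (i * s, (i + 1) * s)] := by
    funext l i; split <;> rfl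
  simp only [hbody, PySem.List.foldl_append_singleton_eq_map, List.nil_append]
  by_cases hpos : 0 < m
  · exact pairs_eq s n m m.toNat 0 (by omega)
  · rw [PySem.List.pyRange_one_eq_nil (by omega)]
    simp
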